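-- pv_equiv track=rewrite | github.com/yoonmyunghoon/JDI | 알고리즘/기타/멀티캠퍼스(SW인재 통합공채)/6.py | countPerms
-- ===== SOURCE A (Python) =====
-- def countPerms(n):
--     # Write your code here
--     if n == 0:
--         return 0
--     elif n == 1:
--         return 5
--     else:
--         data = [1] * 5
--         for i in range(1, n):
--             a_ = data[1]+data[2]+data[4]
--             e_ = data[0]+data[2]
--             i_ = data[1]+data[3]
--             o_ = data[2]
--             u_ = data[2]+data[3]
--             data = [a_, e_, i_, o_, u_]
--         return sum(data)%(10**9+7)
-- ===== SOURCE B (Python) =====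
-- MOD = 10 ** 9 + 7
--
-- # transition matrix: next[i] = sum_j M[i][j] * cur[j]   (vowel order a,e,i,o,u)
-- M = [[0, 1, 1, 0, 1],
--      [1, 0, 1, 0, 0],
--      [0, 1, 0, 1, 0],
--      [0, 0, 1, 0, 0],
--      [0, 0, 1, 1, 0]]
--
--
-- def mat_mul(X, Y):
--     return [[sum(X[i][k] * Y[k][j] for k in range(5)) % MOD
--              for j in range(5)] for i in range(5)]
--
--
-- def mat_pow(R, X, e):
--     # binary exponentiation: R * X^e (for e <= 0 the answer is R)
--     if e <= 0:
--         return R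
--     return mat_pow(mat_mul(R, X) if e % 2 == 1 else R, mat_mul(X, X), e // 2)
--
--
-- def countPerms(n):
--     if n == 0:
--         return 0
--     I = [[1 if i == j else 0 for j in range(5)] for i in range(5)]
--     P = mat_pow(I, M, n - 1)
--     return sum(sum(P[i][j] for j in range(5)) for i in range(5)) % MOD
-- ===== Notes on version B (the rewrite author's own statement) =====
-- stated objective: faster
-- what changed: Replaces A's linear iteration of the vowel-adjacency recurrence by binary exponentiation of the transition matrix, reducing entries modulo the prime at every multiplication.
import Mathlib
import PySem

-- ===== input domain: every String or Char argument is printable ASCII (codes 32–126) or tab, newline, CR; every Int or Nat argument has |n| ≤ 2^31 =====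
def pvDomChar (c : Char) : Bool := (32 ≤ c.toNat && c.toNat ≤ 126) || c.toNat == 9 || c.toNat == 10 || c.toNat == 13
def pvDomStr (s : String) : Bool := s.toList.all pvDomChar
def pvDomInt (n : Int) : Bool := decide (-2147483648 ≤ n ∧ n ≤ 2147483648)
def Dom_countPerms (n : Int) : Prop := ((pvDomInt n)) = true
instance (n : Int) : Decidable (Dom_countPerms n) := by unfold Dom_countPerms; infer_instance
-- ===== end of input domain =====

-- B replaces A's linear iteration of the vowel-adjacency recurrence by binary
-- exponentiation of the transition matrix, reduced modulo the prime (objective: faster).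

-- ===== PORT A =====
-- one body of A's for-loop: data = [a_, e_, i_, o_, u_]
def stepA (d : Int × Int × Int × Int × Int) : Int × Int × Int × Int × Int :=
  match d with
  | (a, e, i, o, u) => (e + i + u, a + i, e + o, i, i + o)

def countPerms (n : Int) : Int :=
  if n = 0 then 0
  else if n = 1 then 5
  else
    let data := (PySem.List.pyRange 1 n 1).foldl (fun d _ => stepA d) (1, 1, 1, 1, 1)
    PySem.Int.mod (data.1 + data.2.1 + data.2.2.1 + data.2.2.2.1 + data.2.2.2.2) (10 ^ 9 + 7)

-- ===== PORT B =====
def bMOD : Int := 10 ^ 9 + 7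

def bMat : List (List Int) :=
  [[0, 1, 1, 0, 1],
   [1, 0, 1, 0, 0],
   [0, 1, 0, 1, 0],
   [0, 0, 1, 0, 0],
   [0, 0, 1, 1, 0]]

def matMul (X Y : List (List Int)) : List (List Int) :=
  (PySem.List.pyRange 0 5 1).map fun i =>
    (PySem.List.pyRange 0 5 1).map fun j =>
      PySem.Int.mod
        (((PySem.List.pyRange 0 5 1).map fun k =>
            PySem.List.pyGetD (PySem.List.pyGetD X i []) k 0 *
              PySem.List.pyGetD (PySem.List.pyGetD Y k []) j 0).sum)
        bMOD

def matPow (R X : List (List Int)) (e : Int) : List (List Int) :=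
  if e ≤ 0 then R
  else matPow (if PySem.Int.mod e 2 = 1 then matMul R X else R) (matMul X X)
      (PySem.Int.floordiv e 2)
termination_by e.toNat
decreasing_by
  rw [PySem.Int.floordiv_eq_ediv_of_pos (by omega : (0:Int) < 2)]
  omega

def countPerms_alt (n : Int) : Int :=
  if n = 0 then 0
  else
    let I := (PySem.List.pyRange 0 5 1).map fun i =>
      (PySem.List.pyRange 0 5 1).map fun j => if i = j then (1 : Int) else 0
    let P := matPow I bMat (n - 1)
    PySem.Int.mod
      (((PySem.List.pyRange 0 5 1).map fun i =>
          ((PySem.List.pyRange 0 5 1).map fun j =>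
            PySem.List.pyGetD (PySem.List.pyGetD P i []) j 0).sum).sum)
      bMOD

-- ===== PRECONDITION & SPEC =====
def Spec_countPerms (n : Int) (out : Int) : Prop := out = countPerms_alt n
instance (n : Int) (out : Int) : Decidable (Spec_countPerms n out) := by unfold Spec_countPerms; infer_instance

-- ===== CLAIM (what is proved, stated in full; the proofs are below) =====
def Claim_equal_countPerms : Prop := ∀ (n : Int), Dom_countPerms n → Spec_countPerms n (countPerms n)

-- ===== LEMMAS AND PROOFS =====

-- the (i,j) entry of a list-of-lists matrix, and its image in ZMod 1000000007
def entry (X : List (List Int)) (i j : Fin 5) : Int :=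
  PySem.List.pyGetD (PySem.List.pyGetD X ((i : Nat) : Int) []) ((j : Nat) : Int) 0

def castM (X : List (List Int)) : Matrix (Fin 5) (Fin 5) (ZMod 1000000007) :=
  Matrix.of fun i j => ((entry X i j : ZMod 1000000007))

def castV (d : Int × Int × Int × Int × Int) : Fin 5 → ZMod 1000000007 :=
  ![(d.1 : ZMod 1000000007), (d.2.1 : ZMod 1000000007), (d.2.2.1 : ZMod 1000000007),
    (d.2.2.2.1 : ZMod 1000000007), (d.2.2.2.2 : ZMod 1000000007)]

theorem pyGetD_map_r5 {a : Type} (d : a) (f : Int → a) (i : Fin 5) :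
    PySem.List.pyGetD ((PySem.List.pyRange 0 5 1).map f) ((i : Nat) : Int) d = f ((i : Nat) : Int) := by
  fin_cases i <;> rfl

theorem sum_map_r5 (g : Int → Int) :
    ((PySem.List.pyRange 0 5 1).map g).sum = ∑ k : Fin 5, g ((k : Nat) : Int) := by
  rw [Fin.sum_univ_five]
  show g 0 + (g 1 + (g 2 + (g 3 + (g 4 + 0)))) = _
  norm_num
  ring

theorem cast_mod_bMOD (x : Int) :
    ((PySem.Int.mod x bMOD : Int) : ZMod 1000000007) = (x : ZMod 1000000007) := by
  rw [PySem.Int.mod_eq_emod_of_pos (by norm_num [bMOD])]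
  have h : (bMOD : Int) = ((1000000007 : Nat) : Int) := by norm_num [bMOD]
  rw [h, ZMod.intCast_mod]

theorem entry_matMul (X Y : List (List Int)) (i j : Fin 5) :
    entry (matMul X Y) i j =
      PySem.Int.mod (∑ k : Fin 5, entry X i k * entry Y k j) bMOD := by
  unfold entry matMul
  rw [pyGetD_map_r5, pyGetD_map_r5, sum_map_r5]

theorem castM_matMul (X Y : List (List Int)) :
    castM (matMul X Y) = castM X * castM Y := by
  funext i j
  simp only [castM, Matrix.of_apply, Matrix.mul_apply, entry_matMul, cast_mod_bMOD]
  push_cast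
  rfl

theorem castM_matPow (R X : List (List Int)) (e : Int) :
    castM (matPow R X e) = castM R * (castM X) ^ e.toNat := by
  induction R, X, e using matPow.induct with
  | case1 R X e h =>
    rw [matPow, if_pos h]
    simp [Int.toNat_of_nonpos h]
  | case2 R X e h ih =>
    rw [matPow, if_neg (by omega)]
    have hmod : PySem.Int.mod e 2 = e % 2 := PySem.Int.mod_eq_emod_of_pos (by omega)
    have hdiv : PySem.Int.floordiv e 2 = e / 2 := PySem.Int.floordiv_eq_ediv_of_pos (by omega)
    by_cases hpar : PySem.Int.mod e 2 = 1
    · rw [dif_pos hpar] at ih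
      rw [if_pos hpar, ih, castM_matMul, castM_matMul, hdiv]
      have hk : e.toNat = 2 * (e / 2).toNat + 1 := by
        rw [hmod] at hpar; omega
      rw [hk, pow_succ', pow_mul, mul_assoc, pow_two]
    · rw [dif_neg hpar] at ih
      rw [if_neg hpar, ih, castM_matMul, hdiv]
      have hk : e.toNat = 2 * (e / 2).toNat := by
        rw [hmod] at hpar; omega
      rw [hk, pow_mul, pow_two]

-- the identity matrix B builds by comprehension
theorem castM_id :
    castM ((PySem.List.pyRange 0 5 1).map fun i =>
      (PySem.List.pyRange 0 5 1).map fun j => if i = j then (1 : Int) else 0) = 1 := by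
  funext i j
  simp only [castM, Matrix.of_apply, entry, pyGetD_map_r5, Matrix.one_apply]
  fin_cases i <;> fin_cases j <;> rfl

theorem castV_stepA (d : Int × Int × Int × Int × Int) :
    castV (stepA d) = Matrix.mulVec (castM bMat) (castV d) := by
  obtain ⟨a, e, i, o, u⟩ := d
  funext x
  fin_cases x <;>
    · show _ = ∑ k : Fin 5, castM bMat _ k * castV (a, e, i, o, u) k
      rw [Fin.sum_univ_five]
      norm_num [castM, entry, bMat, castV, stepA]
      push_cast
      ring

theorem castV_ones :
    castV ((1 : Int), (1 : Int), (1 : Int), (1 : Int), (1 : Int)) =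
      fun _ : Fin 5 => (1 : ZMod 1000000007) := by
  funext x
  fin_cases x <;> rfl

theorem castV_iterate (k : Nat) :
    castV (stepA^[k] (1, 1, 1, 1, 1)) =
      Matrix.mulVec ((castM bMat) ^ k) (castV (1, 1, 1, 1, 1)) := by
  induction k with
  | zero => simp
  | succ m ih =>
    rw [Function.iterate_succ_apply', castV_stepA, ih, pow_succ', Matrix.mulVec_mulVec]

theorem foldl_stepA (l : List Int) (d : Int × Int × Int × Int × Int) :
    l.foldl (fun d _ => stepA d) d = stepA^[l.length] d := by
  induction l generalizing d with
  | nil => rfl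
  | cons x xs ih => simp [List.foldl_cons, ih, Function.iterate_succ_apply]

theorem sum_castV (d : Int × Int × Int × Int × Int) :
    ((d.1 + d.2.1 + d.2.2.1 + d.2.2.2.1 + d.2.2.2.2 : Int) : ZMod 1000000007) =
      ∑ i : Fin 5, castV d i := by
  simp [castV, Fin.sum_univ_five]

theorem emod_eq_of_cast {x y : Int}
    (h : (x : ZMod 1000000007) = (y : ZMod 1000000007)) :
    PySem.Int.mod x bMOD = PySem.Int.mod y bMOD := by
  rw [PySem.Int.mod_eq_emod_of_pos (by norm_num [bMOD]),
      PySem.Int.mod_eq_emod_of_pos (by norm_num [bMOD])]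
  rw [ZMod.intCast_eq_intCast_iff] at h
  have hm := h
  unfold Int.ModEq at hm
  have hb : (bMOD : Int) = ((1000000007 : Nat) : Int) := by norm_num [bMOD]
  rw [hb]
  exact hm

-- the main case: for n ≠ 0 both programs compute (sum of M^(n-1)'s entries) mod p
theorem main_eq (n : Int) :
    PySem.Int.mod
        (((PySem.List.pyRange 1 n 1).foldl (fun d _ => stepA d) (1, 1, 1, 1, 1)).1 +
          ((PySem.List.pyRange 1 n 1).foldl (fun d _ => stepA d) (1, 1, 1, 1, 1)).2.1 +
          ((PySem.List.pyRange 1 n 1).foldl (fun d _ => stepA d) (1, 1, 1, 1, 1)).2.2.1 +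
          ((PySem.List.pyRange 1 n 1).foldl (fun d _ => stepA d) (1, 1, 1, 1, 1)).2.2.2.1 +
          ((PySem.List.pyRange 1 n 1).foldl (fun d _ => stepA d) (1, 1, 1, 1, 1)).2.2.2.2)
        (10 ^ 9 + 7) =
      PySem.Int.mod
        (((PySem.List.pyRange 0 5 1).map fun i =>
            ((PySem.List.pyRange 0 5 1).map fun j =>
              PySem.List.pyGetD (PySem.List.pyGetD
                (matPow ((PySem.List.pyRange 0 5 1).map fun i =>
                  (PySem.List.pyRange 0 5 1).map fun j => if i = j then (1 : Int) else 0)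
                  bMat (n - 1)) i []) j 0).sum).sum)
        bMOD := by
  have hb : (10 : Int) ^ 9 + 7 = bMOD := by norm_num [bMOD]
  rw [hb]
  apply emod_eq_of_cast
  rw [sum_castV, foldl_stepA, PySem.List.length_pyRange_one, castV_iterate, castV_ones]
  have hP : castM (matPow ((PySem.List.pyRange 0 5 1).map fun i =>
        (PySem.List.pyRange 0 5 1).map fun j => if i = j then (1 : Int) else 0)
        bMat (n - 1)) = (castM bMat) ^ (n - 1).toNat := by
    rw [castM_matPow, castM_id, one_mul]
  rw [sum_map_r5]
  have hsum : ∀ i : Fin 5,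
      ((PySem.List.pyRange 0 5 1).map fun j =>
        PySem.List.pyGetD (PySem.List.pyGetD
          (matPow ((PySem.List.pyRange 0 5 1).map fun i =>
            (PySem.List.pyRange 0 5 1).map fun j => if i = j then (1 : Int) else 0)
            bMat (n - 1)) ((i : Nat) : Int) []) j 0).sum =
      ∑ j : Fin 5, entry (matPow ((PySem.List.pyRange 0 5 1).map fun i =>
            (PySem.List.pyRange 0 5 1).map fun j => if i = j then (1 : Int) else 0)
            bMat (n - 1)) i j := by
    intro i
    rw [sum_map_r5]
    rfl
  rw [Finset.sum_congr rfl (fun i _ => hsum i)]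
  push_cast
  have hPij : ∀ i j : Fin 5,
      ((entry (matPow ((PySem.List.pyRange 0 5 1).map fun i =>
          (PySem.List.pyRange 0 5 1).map fun j => if i = j then (1 : Int) else 0)
          bMat (n - 1)) i j : Int) : ZMod 1000000007) =
        ((castM bMat) ^ (n - 1).toNat) i j := by
    intro i j
    rw [← hP]; rfl
  rw [Finset.sum_congr rfl (fun i _ => Finset.sum_congr rfl (fun j _ => hPij i j))]
  simp [Matrix.mulVec, dotProduct]

-- ===== VERDICT (by name: the statement is the Claim_ definition above) =====
theorem countPerms_spec : Claim_equal_countPerms := by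
  intro n _
  unfold Spec_countPerms countPerms countPerms_alt
  by_cases h0 : n = 0
  · simp [h0]
  · rw [if_neg h0, if_neg h0]
    by_cases h1 : n = 1
    · subst h1
      rw [if_pos rfl]
      show (5 : Int) = PySem.Int.mod
        (((PySem.List.pyRange 0 5 1).map fun i =>
            ((PySem.List.pyRange 0 5 1).map fun j =>
              PySem.List.pyGetD (PySem.List.pyGetD
                (matPow ((PySem.List.pyRange 0 5 1).map fun i =>
                  (PySem.List.pyRange 0 5 1).map fun j => if i = j then (1 : Int) else 0)
                  bMat (1 - 1)) i []) j 0).sum).sum)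
        bMOD
      rw [matPow, if_pos (by omega : (1 : Int) - 1 ≤ 0)]
      decide
    · rw [if_neg h1]
      exact main_eq n
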